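-- pv_equiv track=rewrite | github.com/wenet-e2e/wenet | wenet/utils/ctc_utils.py | replace_duplicates_with_blank
-- ===== SOURCE A (Python) =====
-- from typing import List, Tuple
--
-- def replace_duplicates_with_blank(hyp: List[int]) -> List[int]:
--     new_hyp: List[int] = []
--     cur = 0
--     while cur < len(hyp):
--         new_hyp.append(hyp[cur])
--         prev = cur
--         cur += 1
--         while cur < len(hyp) and hyp[cur] == hyp[prev] and hyp[cur] != 0:
--             new_hyp.append(0)
--             cur += 1
--     return new_hyp
-- ===== SOURCE B (Python) =====
-- from typing import List
--
-- def replace_duplicates_with_blank(hyp: List[int]) -> List[int]: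
--     # one pass over (element, previous-element) pairs: a repeated nonzero becomes 0
--     return [0 if v == p and v != 0 else v for v, p in zip(hyp, [None] + hyp)]
-- ===== Notes on version B (the rewrite author's own statement) =====
-- stated objective: idiomatic
-- what changed: Replaced A's nested cursor/inner-while run scan with a single zip-with-previous comprehension: an element becomes 0 iff it equals its immediate predecessor and is nonzero.
import Mathlib
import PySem

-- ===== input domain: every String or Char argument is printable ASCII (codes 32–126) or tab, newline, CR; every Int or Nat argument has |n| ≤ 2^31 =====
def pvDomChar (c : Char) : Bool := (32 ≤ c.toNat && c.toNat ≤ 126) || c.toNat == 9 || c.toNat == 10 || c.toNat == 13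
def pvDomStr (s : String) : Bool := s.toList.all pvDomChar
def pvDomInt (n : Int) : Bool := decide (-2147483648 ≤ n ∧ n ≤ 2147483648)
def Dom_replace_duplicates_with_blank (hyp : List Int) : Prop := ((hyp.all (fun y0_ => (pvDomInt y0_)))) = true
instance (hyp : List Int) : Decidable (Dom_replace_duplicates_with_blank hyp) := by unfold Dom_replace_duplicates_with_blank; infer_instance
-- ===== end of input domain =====

-- B replaces A's nested cursor/inner-while run scan by a single pass over (element, previous) pairs (idiomatic, same cost).

-- ===== PORT A =====
-- A's outer while loop: append hyp[cur], then hand the rest to the inner while.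
-- The cursor over hyp becomes structural recursion on the remaining suffix.
mutual
def pvA_outer : List Int → List Int
  | [] => []
  | x :: rest => x :: pvA_inner x rest
  termination_by l => 2 * l.length
  decreasing_by simp <;> omega
-- A's inner while: while the next element equals hyp[prev] and is nonzero, append 0.
def pvA_inner : Int → List Int → List Int
  | _, [] => []
  | prev, y :: ys => if y = prev ∧ y ≠ 0 then 0 :: pvA_inner prev ys else pvA_outer (y :: ys)
  termination_by _ l => 2 * l.length + 1
  decreasing_by all_goals simp <;> omega
end

def replace_duplicates_with_blank (hyp : List Int) : List Int := pvA_outer hyp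

-- ===== PORT B =====
-- B: [0 if v == p and v != 0 else v for v, p in zip(hyp, [None] + hyp)]
def replace_duplicates_with_blank_alt (hyp : List Int) : List Int :=
  (hyp.zip ((none : Option Int) :: hyp.map some)).map
    (fun vp => if some vp.1 = vp.2 ∧ vp.1 ≠ 0 then 0 else vp.1)

-- ===== PRECONDITION & SPEC =====
def Spec_replace_duplicates_with_blank (hyp : List Int) (out : List Int) : Prop := out = replace_duplicates_with_blank_alt hyp
instance (hyp : List Int) (out : List Int) : Decidable (Spec_replace_duplicates_with_blank hyp out) := by unfold Spec_replace_duplicates_with_blank; infer_instance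

-- ===== CLAIM (what is proved, stated in full; the proofs are below) =====
def Claim_equal_replace_duplicates_with_blank : Prop := ∀ (hyp : List Int), Dom_replace_duplicates_with_blank hyp → Spec_replace_duplicates_with_blank hyp (replace_duplicates_with_blank hyp)

-- ===== LEMMAS AND PROOFS =====

-- B's comprehension, parametrised by the "previous element" paired with the head.
def pvG (p : Option Int) (l : List Int) : List Int :=
  (l.zip (p :: l.map some)).map (fun vp => if some vp.1 = vp.2 ∧ vp.1 ≠ 0 then 0 else vp.1)

lemma pvG_cons (p : Option Int) (x : Int) (xs : List Int) :
    pvG p (x :: xs) = (if some x = p ∧ x ≠ 0 then 0 else x) :: pvG (some x) xs := by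
  simp [pvG, List.zip]

lemma pvG_alt (hyp : List Int) : replace_duplicates_with_blank_alt hyp = pvG none hyp := rfl

lemma pv_key : ∀ (n : Nat) (l : List Int), l.length ≤ n →
    pvA_outer l = pvG none l ∧ ∀ prev, pvA_inner prev l = pvG (some prev) l := by
  intro n
  induction n with
  | zero =>
    intro l hl
    have : l = [] := List.eq_nil_of_length_eq_zero (Nat.le_zero.mp hl)
    subst this
    exact ⟨by simp [pvA_outer, pvG], fun prev => by simp [pvA_inner, pvG]⟩
  | succ n ih =>
    intro l hl
    cases l with
    | nil => exact ⟨by simp [pvA_outer, pvG], fun prev => by simp [pvA_inner, pvG]⟩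
    | cons x xs =>
      have hxs : xs.length ≤ n := by simp at hl; omega
      obtain ⟨ho, hi⟩ := ih xs hxs
      have houter : pvA_outer (x :: xs) = pvG none (x :: xs) := by
        rw [pvA_outer, pvG_cons, hi x]
        simp
      refine ⟨houter, fun prev => ?_⟩
      rw [pvA_inner, pvG_cons]
      by_cases hc : x = prev ∧ x ≠ 0
      · obtain ⟨hxp, hx0⟩ := hc
        subst hxp
        simp [hx0, hi]
      · have hcond : ¬ (some x = some prev ∧ x ≠ 0) := by
          intro ⟨h1, h2⟩; exact hc ⟨Option.some_inj.mp h1, h2⟩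
        rw [if_neg hc, if_neg hcond, houter, pvG_cons]
        simp

-- ===== VERDICT (by name: the statement is the Claim_ definition above) =====
theorem replace_duplicates_with_blank_spec : Claim_equal_replace_duplicates_with_blank := by
  intro hyp _
  unfold Spec_replace_duplicates_with_blank replace_duplicates_with_blank
  rw [pvG_alt]
  exact (pv_key hyp.length hyp le_rfl).1
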